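-- pv_equiv track=rewrite | github.com/montrek-software/montrek | montrek/reporting/core/text_converter.py | headers
-- ===== SOURCE A (Python) =====
-- def headers(text: str) -> str:
--     patterns = {
--         "<h1>": "\\section*{",
--         "</h1>": "}",
--         "<h2>": "\\subsection*{",
--         "</h2>": "}",
--         "<h3>": "\\textbf{",
--         "</h3>": "}\\\\",
--         "<h4>": "\\paragraph{",
--         "</h4>": "}",
--         "<h5>": "\\subparagraph{",
--         "</h5>": "}",
--     }
--     for key, value in patterns.items():
--         text = text.replace(key, value)
--     return text
-- ===== SOURCE B (Python) =====
-- def headers(text: str) -> str: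
--     patterns = {
--         "<h1>": "\\section*{",
--         "</h1>": "}",
--         "<h2>": "\\subsection*{",
--         "</h2>": "}",
--         "<h3>": "\\textbf{",
--         "</h3>": "}\\\\",
--         "<h4>": "\\paragraph{",
--         "</h4>": "}",
--         "<h5>": "\\subparagraph{",
--         "</h5>": "}",
--     }
--     out = []
--     i = 0
--     n = len(text)
--     while i < n:
--         tag4 = text[i:i + 4]
--         tag5 = text[i:i + 5]
--         if tag4 in patterns:
--             out.append(patterns[tag4])
--             i += 4
--         elif tag5 in patterns:
--             out.append(patterns[tag5])
--             i += 5
--         else: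
--             out.append(text[i])
--             i += 1
--     return "".join(out)
-- ===== Notes on version B (the rewrite author's own statement) =====
-- stated objective: alternative
-- what changed: A makes ten sequential full-text str.replace passes (one per tag); B makes a single left-to-right pass over the string, replacing each 4/5-character window found in the tag table.
import Mathlib
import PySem

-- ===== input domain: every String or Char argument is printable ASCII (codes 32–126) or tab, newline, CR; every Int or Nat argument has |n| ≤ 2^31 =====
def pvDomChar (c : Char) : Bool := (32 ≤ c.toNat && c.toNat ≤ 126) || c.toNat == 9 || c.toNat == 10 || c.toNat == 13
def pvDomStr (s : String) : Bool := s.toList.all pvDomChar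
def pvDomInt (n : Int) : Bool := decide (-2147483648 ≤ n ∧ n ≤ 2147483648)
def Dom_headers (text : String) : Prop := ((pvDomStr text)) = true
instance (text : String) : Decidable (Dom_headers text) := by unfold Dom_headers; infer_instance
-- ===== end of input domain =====

-- B replaces A's ten repeated full-text .replace passes by ONE left-to-right scan with a
-- table lookup on the 4/5-character window (objective: alternative single-pass algorithm).

-- ===== PORT A =====
def headersPatternsA : PySem.Dict String String := PySem.Dict.mk
  [("<h1>", "\\section*{"), ("</h1>", "}"),
   ("<h2>", "\\subsection*{"), ("</h2>", "}"),
   ("<h3>", "\\textbf{"), ("</h3>", "}\\\\"),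
   ("<h4>", "\\paragraph{"), ("</h4>", "}"),
   ("<h5>", "\\subparagraph{"), ("</h5>", "}")]

def headers (text : String) : String :=
  (PySem.Dict.items headersPatternsA).foldl
    (fun t kv => PySem.Str.replace t kv.1 kv.2) text

-- ===== PORT B =====
def headersPatternsB : PySem.Dict (List Char) (List Char) := PySem.Dict.mk
  [("<h1>".toList, "\\section*{".toList), ("</h1>".toList, "}".toList),
   ("<h2>".toList, "\\subsection*{".toList), ("</h2>".toList, "}".toList),
   ("<h3>".toList, "\\textbf{".toList), ("</h3>".toList, "}\\\\".toList),
   ("<h4>".toList, "\\paragraph{".toList), ("</h4>".toList, "}".toList),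
   ("<h5>".toList, "\\subparagraph{".toList), ("</h5>".toList, "}".toList)]

-- the while loop of Source B: at index i try the 4-char window, then the 5-char window, else copy
def headersAltGo (l : List Char) : List Char :=
  match l with
  | [] => []
  | c :: t =>
    match PySem.Dict.get? headersPatternsB ((c :: t).take 4) with
    | some v => v ++ headersAltGo (t.drop 3)
    | none =>
      match PySem.Dict.get? headersPatternsB ((c :: t).take 5) with
      | some v => v ++ headersAltGo (t.drop 4)
      | none => c :: headersAltGo t
termination_by l.length
decreasing_by all_goals (simp; try omega)

def headers_alt (text : String) : String := String.ofList (headersAltGo text.toList)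

-- ===== PRECONDITION & SPEC =====
def Spec_headers (text : String) (out : String) : Prop := out = headers_alt text
instance (text : String) (out : String) : Decidable (Spec_headers text out) := by unfold Spec_headers; infer_instance

-- ===== CLAIM (what is proved, stated in full; the proofs are below) =====
def Claim_equal_headers : Prop := ∀ (text : String), Dom_headers text → Spec_headers text (headers text)

-- ===== LEMMAS AND PROOFS =====

-- the ten tag/replacement pairs, over lists of characters
def tagsC : List (List Char × List Char) := (PySem.Dict.items headersPatternsB)

-- characters that may occur in a tag after the leading '<'
def tagChars : List Char := ['/', 'h', '1', '2', '3', '4', '5', '>']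

-- what makes the single simultaneous pass agree with sequential replaces:
-- every key starts with '<' and continues in tagChars; every value is nonempty,
-- contains no '<', and starts outside tagChars
def GoodPair (p : List Char × List Char) : Prop :=
  p.1.head? = some '<' ∧ (∀ d ∈ p.1.drop 1, d ∈ tagChars) ∧
  p.2 ≠ [] ∧ (∀ d ∈ p.2, d ≠ '<') ∧ (∀ d ∈ p.2.head?, d ∉ tagChars)

-- clean recursion computing Python's s.replace(old, new) for old ≠ []
def repC (old new : List Char) : List Char → List Char
  | [] => []
  | c :: t =>
    if old.isPrefixOf (c :: t) then new ++ repC old new (t.drop (old.length - 1))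
    else c :: repC old new t
termination_by l => l.length
decreasing_by all_goals (simp; try omega)

-- one simultaneous pass replacing the first pair of ps that matches at each position
def scanP (ps : List (List Char × List Char)) : List Char → List Char
  | [] => []
  | c :: t =>
    match ps.find? (fun p => p.1.isPrefixOf (c :: t)) with
    | some p => p.2 ++ scanP ps (t.drop (p.1.length - 1))
    | none => c :: scanP ps t
termination_by l => l.length
decreasing_by all_goals (simp; try omega)

lemma replace_go_eq (old new : List Char) (hold : old ≠ []) :
    ∀ (fuel : Nat) (l acc : List Char), l.length ≤ fuel →
      PySem.Chars.replace.go old new fuel l acc = acc.reverse ++ repC old new l := by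
  obtain ⟨o, os, rfl⟩ : ∃ o os, old = o :: os := by
    cases old with
    | nil => exact absurd rfl hold
    | cons o os => exact ⟨o, os, rfl⟩
  intro fuel
  induction fuel with
  | zero =>
    intro l acc hl
    have : l = [] := List.length_eq_zero_iff.mp (Nat.le_zero.mp hl)
    subst this
    simp [PySem.Chars.replace.go, repC]
  | succ n ih =>
    intro l acc hl
    cases l with
    | nil => simp [PySem.Chars.replace.go, repC]
    | cons c t =>
      rw [PySem.Chars.replace.go]
      by_cases hp : (o :: os).isPrefixOf (c :: t)
      · rw [if_pos hp, repC, if_pos hp]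
        have hlen : (List.drop (o :: os).length (c :: t)).length ≤ n := by
          simp at hl ⊢; omega
        rw [ih _ _ hlen]
        simp
      · rw [if_neg hp, repC, if_neg hp]
        have hlen : t.length ≤ n := by simp at hl; omega
        rw [ih _ _ hlen]
        simp

lemma replace_eq_repC (old new s : List Char) (hold : old ≠ []) :
    PySem.Chars.replace s old new = repC old new s := by
  rw [PySem.Chars.replace, if_neg (by simpa using hold)]
  simpa using replace_go_eq old new hold s.length s [] (le_refl _)

lemma repC_append_of_no_lt (old new u x : List Char) (h0 : old.head? = some '<')
    (hu : ∀ d ∈ u, d ≠ '<') :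
    repC old new (u ++ x) = u ++ repC old new x := by
  induction u with
  | nil => simp
  | cons a u' ih =>
    have hnp : ¬ old.isPrefixOf (a :: (u' ++ x)) := by
      intro hpre
      rw [List.isPrefixOf_iff_prefix] at hpre
      cases old with
      | nil => simp at h0
      | cons o ot =>
        have ho : o = '<' := by simpa using h0
        have := List.cons_prefix_cons.mp hpre
        exact hu a (by simp) (by rw [← this.1, ho])
    rw [List.cons_append, repC, if_neg hnp, ih (fun d hd => hu d (by simp [hd]))]
    simp

lemma repC_consume (old new x : List Char) (hold : old ≠ []) :
    repC old new (old ++ x) = new ++ repC old new x := by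
  obtain ⟨o, os, rfl⟩ : ∃ o os, old = o :: os := by
    cases old with
    | nil => exact absurd rfl hold
    | cons o os => exact ⟨o, os, rfl⟩
  rw [List.cons_append, repC,
      if_pos (List.isPrefixOf_iff_prefix.mpr ⟨x, by simp⟩)]
  congr 1
  simp [List.drop_left']

lemma scanP_nil : ∀ l, scanP [] l = l := by
  intro l
  induction l with
  | nil => rw [scanP]
  | cons c t ih => rw [scanP]; simpa using ih

lemma prefix_scanP (ps : List (List Char × List Char)) (hps : ∀ p ∈ ps, GoodPair p) :
    ∀ (kt s : List Char), (∀ d ∈ kt, d ∈ tagChars) →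
      kt <+: scanP ps s → kt <+: s := by
  intro kt
  induction kt with
  | nil => intro s _ _; exact List.nil_prefix
  | cons d kt' ih =>
    intro s hσ hpre
    cases s with
    | nil => rw [scanP] at hpre; simp at hpre
    | cons c s' =>
      rw [scanP] at hpre
      cases hf : ps.find? (fun p => p.1.isPrefixOf (c :: s')) with
      | some p =>
        rw [hf] at hpre
        dsimp only at hpre
        obtain ⟨_, _, hne, _, hhead⟩ := hps p (List.mem_of_find?_eq_some hf)
        cases hp2 : p.2 with
        | nil => exact absurd hp2 hne
        | cons e r =>
          rw [hp2, List.cons_append] at hpre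
          have he : e ∉ tagChars := hhead e (by rw [hp2]; rfl)
          have := (List.cons_prefix_cons.mp hpre).1
          exact absurd (this ▸ hσ d (by simp)) he
      | none =>
        rw [hf] at hpre
        dsimp only at hpre
        have h := List.cons_prefix_cons.mp hpre
        exact List.cons_prefix_cons.mpr
          ⟨h.1, ih s' (fun e he => hσ e (by simp [he])) h.2⟩

lemma scanP_keep (ps : List (List Char × List Char)) (hps : ∀ p ∈ ps, GoodPair p) :
    ∀ (u r : List Char), (∀ p ∈ ps, ¬ p.1 <+: (u ++ r)) →
      (∀ d ∈ u.drop 1, d ∈ tagChars) →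
      scanP ps (u ++ r) = u ++ scanP ps r := by
  intro u
  induction u with
  | nil => simp
  | cons a u' ih =>
    intro r hnofire hσ
    have hf : ps.find? (fun p => p.1.isPrefixOf (a :: (u' ++ r))) = none := by
      refine List.find?_eq_none.mpr (fun p hp => ?_)
      simpa [List.isPrefixOf_iff_prefix] using hnofire p hp
    rw [List.cons_append, scanP, hf]
    cases u' with
    | nil => simp
    | cons b u'' =>
      have hb : b ∈ tagChars := hσ b (by simp)
      have hlt : ('<' : Char) ∉ tagChars := by decide
      rw [ih r ?_ (fun d hd => hσ d (by simp; exact Or.inr (by simpa using hd)))]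
      · simp
      · intro p hp hpre
        obtain ⟨h0, _, _, _, _⟩ := hps p hp
        cases p1 : p.1 with
        | nil => rw [p1] at h0; simp at h0
        | cons o ot =>
          have ho : o = '<' := by rw [p1] at h0; simpa using h0
          rw [p1, List.cons_append] at hpre
          have := (List.cons_prefix_cons.mp hpre).1
          exact hlt (by rw [← this, ho] at hb; exact hb)

lemma main_step (k v : List Char) (hkv : GoodPair (k, v))
    (ps : List (List Char × List Char)) (hps : ∀ p ∈ ps, GoodPair p) :
    ∀ (t : List Char), repC k v (scanP ps t) = scanP (ps ++ [(k, v)]) t := by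
  obtain ⟨hk0, hkσ, _, _, _⟩ := hkv
  obtain ⟨kt, rfl⟩ : ∃ kt, k = '<' :: kt := by
    cases k with
    | nil => simp at hk0
    | cons a kt => exact ⟨kt, by simpa using (congrArg (fun l => (Option.getD l 'x') :: kt) hk0.symm).symm⟩
  suffices H : ∀ n (t : List Char), t.length ≤ n →
      repC ('<' :: kt) v (scanP ps t) = scanP (ps ++ [('<' :: kt, v)]) t by
    intro t; exact H t.length t le_rfl
  intro n
  induction n with
  | zero =>
    intro t ht
    have : t = [] := List.length_eq_zero_iff.mp (Nat.le_zero.mp ht)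
    subst this
    rw [scanP, scanP, repC]
  | succ n ih =>
    intro t ht
    cases t with
    | nil => rw [scanP, scanP, repC]
    | cons c t' =>
      cases hf : ps.find? (fun p => p.1.isPrefixOf (c :: t')) with
      | some p =>
        have hL : scanP ps (c :: t') = p.2 ++ scanP ps (t'.drop (p.1.length - 1)) := by
          rw [scanP, hf]
        have hfR : (ps ++ [('<' :: kt, v)]).find? (fun p => p.1.isPrefixOf (c :: t')) = some p := by
          rw [List.find?_append, hf]; rfl
        have hR : scanP (ps ++ [('<' :: kt, v)]) (c :: t') =
            p.2 ++ scanP (ps ++ [('<' :: kt, v)]) (t'.drop (p.1.length - 1)) := by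
          rw [scanP, hfR]
        obtain ⟨_, _, _, hnolt, _⟩ := hps p (List.mem_of_find?_eq_some hf)
        rw [hL, hR, repC_append_of_no_lt _ _ _ _ (by rfl) hnolt]
        congr 1
        exact ih _ (by simp at ht ⊢; omega)
      | none =>
        by_cases hk : ('<' :: kt).isPrefixOf (c :: t')
        · obtain ⟨r, hr⟩ := List.isPrefixOf_iff_prefix.mp hk
          have hfR : (ps ++ [('<' :: kt, v)]).find? (fun p => p.1.isPrefixOf (c :: t')) =
              some ('<' :: kt, v) := by
            rw [List.find?_append, hf]
            simp only [Option.none_or, List.find?_cons, hk]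
          have hkeep : scanP ps (('<' :: kt) ++ r) = ('<' :: kt) ++ scanP ps r := by
            refine scanP_keep ps hps _ _ (fun p hp hpre => ?_) (by simpa using hkσ)
            rw [hr] at hpre
            have hno := List.find?_eq_none.mp hf p hp
            simp only [List.isPrefixOf_iff_prefix] at hno
            exact hno hpre
          have hrdrop : t'.drop kt.length = r := by
            have h2 : kt ++ r = t' := by injection hr
            rw [← h2, List.drop_left]
          have hrlen : r.length ≤ n := by
            have := congrArg List.length hr
            simp at this ht; omega
          have hR : scanP (ps ++ [('<' :: kt, v)]) (c :: t') =
              v ++ scanP (ps ++ [('<' :: kt, v)]) r := by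
            rw [scanP, hfR]
            dsimp only
            rw [show ('<' :: kt).length - 1 = kt.length by simp, hrdrop]
          rw [hR, ← hr, hkeep, repC_consume _ _ _ (by simp), ih r hrlen]
        · have hL : scanP ps (c :: t') = c :: scanP ps t' := by rw [scanP, hf]
          have hnp : ¬ ('<' :: kt).isPrefixOf (c :: scanP ps t') := by
            intro hcon
            rw [List.isPrefixOf_iff_prefix] at hcon
            have h1 := List.cons_prefix_cons.mp hcon
            have h2 := prefix_scanP ps hps kt t' (by simpa using hkσ) h1.2
            exact hk (List.isPrefixOf_iff_prefix.mpr (List.cons_prefix_cons.mpr ⟨h1.1, h2⟩))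
          have hfR : (ps ++ [('<' :: kt, v)]).find? (fun p => p.1.isPrefixOf (c :: t')) = none := by
            rw [List.find?_append, hf]
            simp only [Option.none_or, List.find?_cons]
            simp [hk]
          have hR : scanP (ps ++ [('<' :: kt, v)]) (c :: t') =
              c :: scanP (ps ++ [('<' :: kt, v)]) t' := by
            rw [scanP, hfR]
          rw [hL, hR, repC, if_neg hnp, ih t' (by simp at ht; omega)]

lemma fold_main :
    ∀ (qs ps : List (List Char × List Char)) (t : List Char),
      (∀ p ∈ ps ++ qs, GoodPair p) →
      qs.foldl (fun s kv => repC kv.1 kv.2 s) (scanP ps t) = scanP (ps ++ qs) t := by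
  intro qs
  induction qs with
  | nil => intro ps t _; simp
  | cons q qs' ih =>
    intro ps t hall
    have hq : GoodPair q := hall q (by simp)
    have hps : ∀ p ∈ ps, GoodPair p := fun p hp => hall p (by simp [hp])
    rw [List.foldl_cons,
      show repC q.1 q.2 (scanP ps t) = scanP (ps ++ [q]) t from by
        have := main_step q.1 q.2 (by simpa using hq) ps hps t
        simpa using this,
      ih (ps ++ [q]) t (by intro p hp; apply hall; simp at hp ⊢; tauto)]
    congr 1
    simp

lemma goodTags : ∀ p ∈ tagsC, GoodPair p := by
  intro p hp
  unfold tagsC headersPatternsB at hp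
  simp at hp
  rcases hp with rfl|rfl|rfl|rfl|rfl|rfl|rfl|rfl|rfl|rfl <;>
    exact ⟨by decide, fun d hd => by fin_cases hd <;> decide, by decide,
           fun d hd => by fin_cases hd <;> decide, fun d hd => by simp at hd; subst hd; decide⟩

lemma get?_mk_mem {κ ν : Type} [BEq κ] [LawfulBEq κ] (l : List (κ × ν)) (u : κ) (v : ν)
    (h : PySem.Dict.get? (PySem.Dict.mk l) u = some v) : (u, v) ∈ l := by
  unfold PySem.Dict.get? at h
  cases hf : List.find? (fun p => p.1 == u) l with
  | none => rw [hf] at h; simp at h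
  | some p =>
    rw [hf] at h
    simp at h
    have h1 : p.1 = u := by simpa using List.find?_some hf
    have h2 := List.mem_of_find?_eq_some hf
    rw [← h1, ← h]
    simpa using h2

lemma tags_facts : ∀ p ∈ tagsC, (p.1.length = 4 ∨ p.1.length = 5) ∧
    PySem.Dict.get? headersPatternsB p.1 = some p.2 := by
  intro p hp
  unfold tagsC headersPatternsB at hp
  simp at hp
  rcases hp with rfl|rfl|rfl|rfl|rfl|rfl|rfl|rfl|rfl|rfl <;> exact ⟨by decide, by decide⟩

lemma altGo_eq_scanP : ∀ l, headersAltGo l = scanP tagsC l := by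
  suffices H : ∀ n (l : List Char), l.length ≤ n → headersAltGo l = scanP tagsC l by
    intro l; exact H l.length l le_rfl
  intro n
  induction n with
  | zero =>
    intro l hl
    have : l = [] := List.length_eq_zero_iff.mp (Nat.le_zero.mp hl)
    subst this
    rw [headersAltGo.eq_def, scanP.eq_def]
  | succ n ih =>
    intro l hl
    cases l with
    | nil => rw [headersAltGo.eq_def, scanP.eq_def]
    | cons c t =>
      cases hg4 : PySem.Dict.get? headersPatternsB ((c :: t).take 4) with
      | some v4 =>
        have hmem := get?_mk_mem _ _ _ hg4
        simp only [List.mem_cons, List.not_mem_nil, or_false, Prod.mk.injEq] at hmem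
        rcases hmem with ⟨h,rfl⟩|⟨h,rfl⟩|⟨h,rfl⟩|⟨h,rfl⟩|⟨h,rfl⟩|⟨h,rfl⟩|⟨h,rfl⟩|⟨h,rfl⟩|⟨h,rfl⟩|⟨h,rfl⟩
        · obtain ⟨rest, hr⟩ := (h ▸ List.take_prefix 4 (c :: t) : ("<h1>").toList <+: c :: t)
          have hlen : rest.length ≤ n := by
            have := congrArg List.length hr; simp at this hl; omega
          rw [← hr, headersAltGo.eq_def, scanP.eq_def]
          simp [tagsC, headersPatternsB, PySem.Dict.get?, List.isPrefixOf, ih rest hlen]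
        · have := congrArg List.length h
          simp at this hl; omega
        · obtain ⟨rest, hr⟩ := (h ▸ List.take_prefix 4 (c :: t) : ("<h2>").toList <+: c :: t)
          have hlen : rest.length ≤ n := by
            have := congrArg List.length hr; simp at this hl; omega
          rw [← hr, headersAltGo.eq_def, scanP.eq_def]
          simp [tagsC, headersPatternsB, PySem.Dict.get?, List.isPrefixOf, ih rest hlen]
        · have := congrArg List.length h
          simp at this hl; omega
        · obtain ⟨rest, hr⟩ := (h ▸ List.take_prefix 4 (c :: t) : ("<h3>").toList <+: c :: t)
          have hlen : rest.length ≤ n := by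
            have := congrArg List.length hr; simp at this hl; omega
          rw [← hr, headersAltGo.eq_def, scanP.eq_def]
          simp [tagsC, headersPatternsB, PySem.Dict.get?, List.isPrefixOf, ih rest hlen]
        · have := congrArg List.length h
          simp at this hl; omega
        · obtain ⟨rest, hr⟩ := (h ▸ List.take_prefix 4 (c :: t) : ("<h4>").toList <+: c :: t)
          have hlen : rest.length ≤ n := by
            have := congrArg List.length hr; simp at this hl; omega
          rw [← hr, headersAltGo.eq_def, scanP.eq_def]
          simp [tagsC, headersPatternsB, PySem.Dict.get?, List.isPrefixOf, ih rest hlen]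
        · have := congrArg List.length h
          simp at this hl; omega
        · obtain ⟨rest, hr⟩ := (h ▸ List.take_prefix 4 (c :: t) : ("<h5>").toList <+: c :: t)
          have hlen : rest.length ≤ n := by
            have := congrArg List.length hr; simp at this hl; omega
          rw [← hr, headersAltGo.eq_def, scanP.eq_def]
          simp [tagsC, headersPatternsB, PySem.Dict.get?, List.isPrefixOf, ih rest hlen]
        · have := congrArg List.length h
          simp at this hl; omega
      | none =>
        cases hg5 : PySem.Dict.get? headersPatternsB ((c :: t).take 5) with
        | some v5 =>
          have hmem := get?_mk_mem _ _ _ hg5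
          simp only [List.mem_cons, List.not_mem_nil, or_false, Prod.mk.injEq] at hmem
          rcases hmem with ⟨h,rfl⟩|⟨h,rfl⟩|⟨h,rfl⟩|⟨h,rfl⟩|⟨h,rfl⟩|⟨h,rfl⟩|⟨h,rfl⟩|⟨h,rfl⟩|⟨h,rfl⟩|⟨h,rfl⟩
          · have h4 : (c :: t).take 4 = ("<h1>").toList := by
              have := congrArg (List.take 4) h
              simpa [List.take_take] using this
            rw [h4] at hg4
            exact absurd hg4 (by decide)
          · obtain ⟨rest, hr⟩ := (h ▸ List.take_prefix 5 (c :: t) : ("</h1>").toList <+: c :: t)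
            have hlen : rest.length ≤ n := by
              have := congrArg List.length hr; simp at this hl; omega
            rw [← hr, headersAltGo.eq_def, scanP.eq_def]
            simp [tagsC, headersPatternsB, PySem.Dict.get?, List.isPrefixOf, ih rest hlen]
          · have h4 : (c :: t).take 4 = ("<h2>").toList := by
              have := congrArg (List.take 4) h
              simpa [List.take_take] using this
            rw [h4] at hg4
            exact absurd hg4 (by decide)
          · obtain ⟨rest, hr⟩ := (h ▸ List.take_prefix 5 (c :: t) : ("</h2>").toList <+: c :: t)
            have hlen : rest.length ≤ n := by
              have := congrArg List.length hr; simp at this hl; omega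
            rw [← hr, headersAltGo.eq_def, scanP.eq_def]
            simp [tagsC, headersPatternsB, PySem.Dict.get?, List.isPrefixOf, ih rest hlen]
          · have h4 : (c :: t).take 4 = ("<h3>").toList := by
              have := congrArg (List.take 4) h
              simpa [List.take_take] using this
            rw [h4] at hg4
            exact absurd hg4 (by decide)
          · obtain ⟨rest, hr⟩ := (h ▸ List.take_prefix 5 (c :: t) : ("</h3>").toList <+: c :: t)
            have hlen : rest.length ≤ n := by
              have := congrArg List.length hr; simp at this hl; omega
            rw [← hr, headersAltGo.eq_def, scanP.eq_def]
            simp [tagsC, headersPatternsB, PySem.Dict.get?, List.isPrefixOf, ih rest hlen]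
          · have h4 : (c :: t).take 4 = ("<h4>").toList := by
              have := congrArg (List.take 4) h
              simpa [List.take_take] using this
            rw [h4] at hg4
            exact absurd hg4 (by decide)
          · obtain ⟨rest, hr⟩ := (h ▸ List.take_prefix 5 (c :: t) : ("</h4>").toList <+: c :: t)
            have hlen : rest.length ≤ n := by
              have := congrArg List.length hr; simp at this hl; omega
            rw [← hr, headersAltGo.eq_def, scanP.eq_def]
            simp [tagsC, headersPatternsB, PySem.Dict.get?, List.isPrefixOf, ih rest hlen]
          · have h4 : (c :: t).take 4 = ("<h5>").toList := by
              have := congrArg (List.take 4) h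
              simpa [List.take_take] using this
            rw [h4] at hg4
            exact absurd hg4 (by decide)
          · obtain ⟨rest, hr⟩ := (h ▸ List.take_prefix 5 (c :: t) : ("</h5>").toList <+: c :: t)
            have hlen : rest.length ≤ n := by
              have := congrArg List.length hr; simp at this hl; omega
            rw [← hr, headersAltGo.eq_def, scanP.eq_def]
            simp [tagsC, headersPatternsB, PySem.Dict.get?, List.isPrefixOf, ih rest hlen]
        | none =>
          have hf : tagsC.find? (fun p => p.1.isPrefixOf (c :: t)) = none := by
            refine List.find?_eq_none.mpr (fun p hp => ?_)
            intro hpre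
            rw [List.isPrefixOf_iff_prefix] at hpre
            obtain ⟨hlen45, hget⟩ := tags_facts p hp
            rcases hlen45 with h4 | h5
            · have hth : (c :: t).take 4 = p.1 := by
                rw [← h4]; exact (List.prefix_iff_eq_take.mp hpre).symm
              rw [hth, hget] at hg4; simp at hg4
            · have hth : (c :: t).take 5 = p.1 := by
                rw [← h5]; exact (List.prefix_iff_eq_take.mp hpre).symm
              rw [hth, hget] at hg5; simp at hg5
          rw [headersAltGo.eq_def, scanP.eq_def]
          dsimp only
          rw [hg4]; dsimp only
          rw [hg5]; dsimp only
          rw [hf]; dsimp only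
          exact congrArg _ (ih t (by simp at hl; omega))

lemma toList_foldl_replace :
    ∀ (l : List (String × String)) (s : String), (∀ p ∈ l, p.1.toList ≠ []) →
      (l.foldl (fun t kv => PySem.Str.replace t kv.1 kv.2) s).toList =
        (l.map (fun p => (p.1.toList, p.2.toList))).foldl
          (fun s kv => repC kv.1 kv.2 s) s.toList := by
  intro l
  induction l with
  | nil => intro s _; simp
  | cons q l' ih =>
    intro s hne
    rw [List.foldl_cons, ih _ (fun p hp => hne p (by simp [hp])), List.map_cons,
        List.foldl_cons]
    congr 1
    rw [PySem.Str.toList_replace, replace_eq_repC _ _ _ (hne q (by simp))]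

lemma headers_toList (text : String) :
    (headers text).toList = tagsC.foldl (fun s kv => repC kv.1 kv.2 s) text.toList := by
  rw [headers, toList_foldl_replace _ _ (by decide),
      show (PySem.Dict.items headersPatternsA).map (fun p => (p.1.toList, p.2.toList)) = tagsC
        from by decide]

-- ===== VERDICT (by name: the statement is the Claim_ definition above) =====
theorem headers_spec : Claim_equal_headers := by
  intro text _
  unfold Spec_headers
  apply String.toList_inj.mp
  rw [headers_toList, headers_alt, String.toList_ofList, altGo_eq_scanP]
  have h := fold_main tagsC [] text.toList (by simpa using goodTags)
  rw [scanP_nil] at h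
  simpa using h
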